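-- pv_equiv track=rewrite | github.com/chatasweetie/whiteboarding-and-coding-problems | questions/coins/solution/coins_arcy.py | coins_recursive
-- ===== SOURCE A (Python) =====
-- def coins_recursive(num_coins):
--     if num_coins == 0:
--         return {0}
--
--     results = set()
--     # Try adding a penny to all previous results
--     for prev_amount in coins_recursive(num_coins - 1):
--         results.add(prev_amount + 1)
--     # Try adding a dime to all previous results
--     for prev_amount in coins_recursive(num_coins - 1):
--         results.add(prev_amount + 10)
--
--     return results
-- ===== SOURCE B (Python) =====
-- def coins_recursive(num_coins):
--     # Closed form: with p pennies and d dimes, p + d = num_coins, total = num_coins + 9*d.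
--     if num_coins < 0:
--         raise ValueError("num_coins must be non-negative")
--     return {num_coins + 9 * d for d in range(num_coins + 1)}
-- ===== Notes on version B (the rewrite author's own statement) =====
-- stated objective: alternative
-- what changed: Replaces the exponential double recursion with the closed form {num_coins + 9*d for d in range(num_coins+1)}; B rejects negative counts with ValueError where A dies with RecursionError.
import Mathlib
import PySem

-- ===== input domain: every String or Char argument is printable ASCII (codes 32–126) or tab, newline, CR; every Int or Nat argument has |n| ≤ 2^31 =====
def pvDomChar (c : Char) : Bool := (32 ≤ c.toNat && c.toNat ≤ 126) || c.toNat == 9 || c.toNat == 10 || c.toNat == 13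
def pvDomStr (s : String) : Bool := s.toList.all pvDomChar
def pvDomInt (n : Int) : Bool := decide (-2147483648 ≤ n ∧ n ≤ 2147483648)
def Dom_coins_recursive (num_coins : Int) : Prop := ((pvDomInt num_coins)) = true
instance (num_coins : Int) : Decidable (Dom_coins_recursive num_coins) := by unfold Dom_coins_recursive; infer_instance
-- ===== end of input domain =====

-- B computes the set in closed form, {n + 9*d | 0 ≤ d ≤ n}, instead of A's double recursion.

-- ===== PORT A =====
-- A's recursion, on the natural-number recursion depth; `results = set()` then two
-- `for`-loops over the recursive result, `results.add(...)` each time.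
def coinsRecA : Nat → List Int
  | 0 => [0]
  | n + 1 =>
    let prev := coinsRecA n
    let results : PySem.Set Int := PySem.Set.empty
    let results := prev.foldl (fun s x => PySem.Set.add s (x + 1)) results
    prev.foldl (fun s x => PySem.Set.add s (x + 10)) results

-- The Python recursion raises RecursionError for num_coins < 0 (and for num_coins beyond the
-- recursion limit); where it raises nothing is compared, and the `if` only makes the port total.
def coins_recursive (num_coins : Int) : List Int :=
  if num_coins < 0 then [] else coinsRecA num_coins.toNat

-- ===== PORT B =====
-- Python B raises ValueError for num_coins < 0 (outside Pre_); the `if` only makes the port total.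
def coins_recursive_alt (num_coins : Int) : List Int :=
  if num_coins < 0 then []
  else PySem.Set.ofList ((PySem.List.pyRange 0 (num_coins + 1) 1).map (fun d => num_coins + 9 * d))

-- ===== PRECONDITION & SPEC =====
-- Pre_ excludes num_coins < 0, where the Python recursion never reaches its base case (RecursionError).
def Pre_coins_recursive (num_coins : Int) : Prop := 0 ≤ num_coins
instance (num_coins : Int) : Decidable (Pre_coins_recursive num_coins) := by unfold Pre_coins_recursive; infer_instance
def pvWitness_coins_recursive : Int := (17)

def Spec_coins_recursive (num_coins : Int) (out : List Int) : Prop := out = coins_recursive_alt num_coins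
instance (num_coins : Int) (out : List Int) : Decidable (Spec_coins_recursive num_coins out) := by unfold Spec_coins_recursive; infer_instance

-- ===== CLAIM (what is proved, stated in full; the proofs are below) =====
def Claim_equal_coins_recursive : Prop := ∀ (num_coins : Int), Dom_coins_recursive num_coins → Pre_coins_recursive num_coins → Spec_coins_recursive num_coins (coins_recursive num_coins)

-- ===== LEMMAS AND PROOFS =====

-- folding `Set.add` over elements already present is a no-op
theorem foldl_add_mem (l s : List Int) (h : ∀ x ∈ l, x ∈ s) :
    l.foldl PySem.Set.add s = s := by
  induction l generalizing s with
  | nil => rfl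
  | cons a l ih =>
    have ha : a ∈ s := h a (by simp)
    simp only [List.foldl_cons]
    rw [show PySem.Set.add s a = s by simp [PySem.Set.add, ha]]
    exact ih s (fun x hx => h x (by simp [hx]))

-- folding `Set.add` over pairwise-distinct fresh elements appends them
theorem foldl_add_fresh (l s : List Int) (hnd : l.Nodup) (h : ∀ x ∈ l, x ∉ s) :
    l.foldl PySem.Set.add s = s ++ l := by
  induction l generalizing s with
  | nil => simp
  | cons a l ih =>
    have ha : a ∉ s := h a (by simp)
    simp only [List.foldl_cons]
    rw [show PySem.Set.add s a = s ++ [a] by simp [PySem.Set.add, ha]]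
    rw [ih (s ++ [a]) hnd.of_cons]
    · simp
    · intro x hx
      simp only [List.mem_append, List.mem_singleton]
      rintro (hxs | rfl)
      · exact h x (by simp [hx]) hxs
      · exact (List.nodup_cons.mp hnd).1 hx

theorem coinsRecA_eq (n : Nat) :
    coinsRecA n = (List.range (n + 1)).map (fun d : Nat => (n : Int) + 9 * (d : Int)) := by
  induction n with
  | zero => simp [coinsRecA]
  | succ n ih =>
    have hfold1 : ∀ (l : List Int) (s : List Int), l.foldl (fun s x => PySem.Set.add s (x + 1)) s
        = (l.map (fun x => x + 1)).foldl PySem.Set.add s := by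
      intro l s; rw [List.foldl_map]
    have hfold10 : ∀ (l : List Int) (s : List Int), l.foldl (fun s x => PySem.Set.add s (x + 10)) s
        = (l.map (fun x => x + 10)).foldl PySem.Set.add s := by
      intro l s; rw [List.foldl_map]
    have hinj : ∀ c : Int, Function.Injective (fun d : Nat => c + 9 * (d : Int)) := by
      intro c a b hab; simp only at hab; omega
    -- first loop: all elements fresh and distinct
    have h1 : (coinsRecA n).foldl (fun s x => PySem.Set.add s (x + 1)) PySem.Set.empty
        = (List.range (n + 1)).map (fun d : Nat => ((n : Int) + 1) + 9 * (d : Int)) := by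
      rw [hfold1, ih, List.map_map]
      have : ((fun x : Int => x + 1) ∘ fun d : Nat => (n : Int) + 9 * d)
          = fun d : Nat => ((n : Int) + 1) + 9 * d := by funext d; simp; ring
      rw [this]
      rw [foldl_add_fresh _ _ (List.nodup_range.map (hinj _)) (by simp [PySem.Set.empty])]
      simp [PySem.Set.empty]
    -- second loop: shift by 10 = re-index d ↦ d+1; all but the last already present
    rw [show coinsRecA (n + 1)
        = (coinsRecA n).foldl (fun s x => PySem.Set.add s (x + 10))
            ((coinsRecA n).foldl (fun s x => PySem.Set.add s (x + 1)) PySem.Set.empty) from rfl]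
    rw [h1, hfold10, ih, List.map_map]
    have hcomp : ((fun x : Int => x + 10) ∘ fun d : Nat => (n : Int) + 9 * d)
        = fun d : Nat => ((n : Int) + 1) + 9 * ((d : Int) + 1) := by funext d; simp; ring
    rw [hcomp]
    set S := (List.range (n + 1)).map (fun d : Nat => ((n : Int) + 1) + 9 * (d : Int)) with hS
    rw [List.range_succ, List.map_append, List.foldl_append]
    rw [foldl_add_mem _ S (by
      intro x hx
      rw [hS]
      simp only [List.mem_map, List.mem_range] at hx ⊢
      obtain ⟨d, hd, rfl⟩ := hx
      exact ⟨d + 1, by omega, by push_cast; ring⟩)]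
    -- the last element, d = n, is new
    simp only [List.map_cons, List.map_nil, List.foldl_cons, List.foldl_nil]
    have hfresh : (((n : Int) + 1) + 9 * ((n : Int) + 1)) ∉ S := by
      rw [hS]
      simp only [List.mem_map, List.mem_range, not_exists, not_and]
      intro d hd h9; omega
    rw [show PySem.Set.add S (((n : Int) + 1) + 9 * ((n : Int) + 1))
        = S ++ [((n : Int) + 1) + 9 * ((n : Int) + 1)] by
      simp [PySem.Set.add, hfresh]]
    rw [hS, show (n + 1) + 1 = (n + 2) from rfl, List.range_succ (n := n + 1), List.map_append]
    simp only [List.map_cons, List.map_nil]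
    push_cast
    rfl

-- ===== VERDICT (by name: the statement is the Claim_ definition above) =====
theorem coins_recursive_spec : Claim_equal_coins_recursive := by
  intro n _ hpre
  have hn : (0:Int) ≤ n := hpre
  unfold Spec_coins_recursive coins_recursive coins_recursive_alt
  rw [if_neg (by omega), if_neg (by omega)]
  rw [coinsRecA_eq]
  rw [PySem.List.pyRange_one]
  have hn1 : (n + 1 - 0).toNat = n.toNat + 1 := by omega
  rw [hn1, List.map_map]
  have hf : ((fun d : Int => n + 9 * d) ∘ fun k : Nat => (0 : Int) + (k : Int))
      = fun k : Nat => n + 9 * (k : Int) := by funext k; simp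
  rw [hf]
  have hnd : ((List.range (n.toNat + 1)).map (fun k : Nat => n + 9 * (k : Int))).Nodup := by
    refine List.nodup_range.map ?_
    intro a b hab; simp only at hab; omega
  rw [show PySem.Set.ofList ((List.range (n.toNat + 1)).map (fun k : Nat => n + 9 * (k : Int)))
      = (List.range (n.toNat + 1)).map (fun k : Nat => n + 9 * (k : Int)) by
    rw [PySem.Set.ofList_eq_foldl]
    simpa using foldl_add_fresh _ [] hnd (by simp)]
  have : (n.toNat : Int) = n := Int.toNat_of_nonneg hn
  rw [this]
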